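-- pv_equiv track=rewrite | github.com/ddung1203/TIL | COS_Pro/COS_PRO_2차/비밀번호_검사.py | solution
-- ===== SOURCE A (Python) =====
-- def solution(password):
-- 	length = len(password)
-- 	for i in range(length - 2):
-- 		first_check = ord(password[i + 1]) - ord(password[i])
-- 		second_check = ord(password[i+2]) - ord(password[i+1])
-- 		if first_check == second_check and (first_check == 1 or first_check == -1):
-- 			return False
-- 	return True
-- ===== SOURCE B (Python) =====
-- def solution(password):
--     # Run-length decomposition: split the password into maximal runs of
--     # characters stepping by a constant +1 or -1 (runs share their boundary
--     # character), then check that every run is shorter than 3.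
--     runs = []
--     n = len(password)
--     i = 0
--     while i + 1 < n:
--         step = ord(password[i + 1]) - ord(password[i])
--         if step == 1 or step == -1:
--             k = i + 1
--             while k + 1 < n and ord(password[k + 1]) - ord(password[k]) == step:
--                 k += 1
--             runs.append(k - i + 1)
--             i = k
--         else:
--             runs.append(1)
--             i += 1
--     if i < n:
--         runs.append(1)
--     return all(r < 3 for r in runs)
-- ===== Notes on version B (the rewrite author's own statement) =====
-- stated objective: alternative
-- what changed: B run-length-encodes the password into maximal arithmetic +1/-1 runs (overlapping at run boundaries) and returns whether every run is shorter than 3, replacing A's sliding three-character window test.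
import Mathlib
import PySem

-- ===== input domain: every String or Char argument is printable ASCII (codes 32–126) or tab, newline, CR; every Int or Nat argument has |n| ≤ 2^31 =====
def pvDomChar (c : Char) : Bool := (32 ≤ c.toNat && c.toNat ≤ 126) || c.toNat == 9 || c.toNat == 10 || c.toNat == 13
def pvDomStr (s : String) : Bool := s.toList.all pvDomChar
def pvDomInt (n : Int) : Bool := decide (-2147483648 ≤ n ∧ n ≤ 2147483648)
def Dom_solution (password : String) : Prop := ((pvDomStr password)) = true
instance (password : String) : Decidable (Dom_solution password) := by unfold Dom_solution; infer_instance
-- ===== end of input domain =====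

-- B run-length-encodes the password into maximal ±1 arithmetic runs and checks every run length < 3,
-- instead of A's sliding three-character window test (alternative decomposition, same cost).

-- ===== PORT A =====
-- character at index i as its code point; A's loop only reads in-range indices, so the default is never used
def pvChAt (l : List Char) (i : Int) : Int :=
  ((PySem.List.pyGet? l i).getD ' ').toNat

def pvLoopA (l : List Char) : List Int → Bool
  | [] => true
  | i :: is =>
    let first := pvChAt l (i + 1) - pvChAt l i
    let second := pvChAt l (i + 2) - pvChAt l (i + 1)
    if first = second ∧ (first = 1 ∨ first = -1) then false
    else pvLoopA l is

def solution (password : String) : Bool :=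
  let l := password.toList
  let length : Int := l.length
  pvLoopA l (PySem.List.pyRange 0 (length - 2) 1)

-- ===== PORT B =====
-- inner while loop: how many further characters continue the run with difference `step` from `prev`
def pvChain (step : Int) (prev : Char) : List Char → Nat
  | [] => 0
  | c :: t => if (c.toNat : Int) - prev.toNat = step then pvChain step c t + 1 else 0

-- outer while loop: list of maximal-run lengths (runs share their boundary character, as chars[k:] does)
def pvRuns : List Char → List Nat
  | [] => []
  | [_] => [1]
  | a :: b :: t =>
    let step := (b.toNat : Int) - (a.toNat : Int)
    if step = 1 ∨ step = -1 then
      let k := pvChain step b t + 1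
      (k + 1) :: pvRuns ((a :: b :: t).drop k)
    else
      1 :: pvRuns (b :: t)
  termination_by l => l.length
  decreasing_by
  · simp only [List.length_drop, List.length_cons]
    omega
  · simp

def solution_alt (password : String) : Bool :=
  (pvRuns password.toList).all (fun r => r < 3)

-- ===== PRECONDITION & SPEC =====
def Spec_solution (password : String) (out : Bool) : Prop := out = solution_alt password
instance (password : String) (out : Bool) : Decidable (Spec_solution password out) := by unfold Spec_solution; infer_instance

-- ===== CLAIM (what is proved, stated in full; the proofs are below) =====
def Claim_equal_solution : Prop := ∀ (password : String), Dom_solution password → Spec_solution password (solution password)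

-- ===== LEMMAS AND PROOFS =====

-- A's scan, restated as a structural recursion on the character list
def scanA : List Char → Bool
  | a :: b :: c :: t =>
    let first := (b.toNat : Int) - (a.toNat : Int)
    let second := (c.toNat : Int) - (b.toNat : Int)
    if first = second ∧ (first = 1 ∨ first = -1) then false
    else scanA (b :: c :: t)
  | _ => true

lemma pvChAt_of_drop {l : List Char} {k : Nat} {a : Char} {t : List Char}
    (h : l.drop k = a :: t) : pvChAt l (k : Int) = a.toNat := by
  have h0 : l[k]? = some a := by
    have := @List.getElem?_drop _ l k 0
    simp [h] at this
    simpa using this.symm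
  simp [pvChAt, PySem.List.pyGet?_natCast, h0]

lemma pvLoopA_eq_scanA : ∀ (t l : List Char) (k : Nat), l.drop k = t →
    pvLoopA l (PySem.List.pyRange (k : Int) ((l.length : Int) - 2) 1) = scanA t := by
  intro t
  induction t with
  | nil =>
    intro l k h
    have hlen : l.length - k = 0 := by simpa [h] using (List.length_drop (l := l) (i := k)).symm
    rw [PySem.List.pyRange_one_eq_nil (by omega)]
    simp [pvLoopA, scanA]
  | cons a t ih =>
    intro l k h
    match t, ih with
    | [], _ =>
      have hlen : l.length - k = 1 := by simpa [h] using (List.length_drop (l := l) (i := k)).symm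
      rw [PySem.List.pyRange_one_eq_nil (by omega)]
      simp [pvLoopA, scanA]
    | [b], _ =>
      have hlen : l.length - k = 2 := by simpa [h] using (List.length_drop (l := l) (i := k)).symm
      rw [PySem.List.pyRange_one_eq_nil (by omega)]
      simp [pvLoopA, scanA]
    | b :: c :: t', ih =>
      have hlen : l.length - k = t'.length + 3 := by
        simpa [h] using (List.length_drop (l := l) (i := k)).symm
      have hdrop1 : l.drop (k + 1) = b :: c :: t' := by
        have := @List.tail_drop _ l k
        rw [h] at this
        simpa using this.symm
      have hdrop2 : l.drop (k + 2) = c :: t' := by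
        have := @List.tail_drop _ l (k+1)
        rw [hdrop1] at this
        simpa using this.symm
      have ha : pvChAt l (k : Int) = a.toNat := pvChAt_of_drop h
      have hb : pvChAt l ((k : Int) + 1) = b.toNat := by
        have := pvChAt_of_drop hdrop1
        rw [show ((k + 1 : Nat) : Int) = (k : Int) + 1 by push_cast; ring] at this
        exact this
      have hc : pvChAt l ((k : Int) + 2) = c.toNat := by
        have := pvChAt_of_drop hdrop2
        rw [show ((k + 2 : Nat) : Int) = (k : Int) + 2 by push_cast; ring] at this
        exact this
      rw [PySem.List.pyRange_one_cons (by omega)]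
      have hih := ih l (k + 1) hdrop1
      rw [show ((k + 1 : Nat) : Int) = (k : Int) + 1 by push_cast; ring] at hih
      show (if _ then _ else _) = _
      rw [hb, hc, ha]
      show _ = scanA (a :: b :: c :: t')
      rw [scanA]
      split_ifs with hif
      · rfl
      · exact hih

lemma scanA_eq_runs : ∀ (n : Nat) (t : List Char), t.length ≤ n →
    scanA t = (pvRuns t).all (fun r => r < 3) := by
  intro n
  induction n with
  | zero =>
    intro t ht
    have : t = [] := List.length_eq_zero_iff.mp (Nat.le_zero.mp ht)
    subst this
    simp [scanA, pvRuns]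
  | succ n ih =>
    intro t ht
    match t with
    | [] => simp [scanA, pvRuns]
    | [a] => simp [scanA, pvRuns]
    | a :: b :: t' =>
      rw [pvRuns]
      by_cases hstep : ((b.toNat : Int) - (a.toNat : Int) = 1 ∨ (b.toNat : Int) - (a.toNat : Int) = -1)
      · rw [if_pos hstep]
        match t' with
        | [] =>
          -- run of length 2, then the trailing single character
          simp [pvChain, scanA, pvRuns]
        | c :: t'' =>
          by_cases hc : ((c.toNat : Int) - (b.toNat : Int) = (b.toNat : Int) - (a.toNat : Int))
          · -- three consecutive equal ±1 steps: A returns false, B's head run has length ≥ 3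
            have hA : scanA (a :: b :: c :: t'') = false := by
              rw [scanA]
              rw [if_pos ⟨hc.symm, hstep⟩]
            have hchain : pvChain ((b.toNat : Int) - (a.toNat : Int)) b (c :: t'') =
                pvChain ((b.toNat : Int) - (a.toNat : Int)) c t'' + 1 := by
              rw [pvChain, if_pos hc]
            rw [hA, hchain]
            simp
          · -- run stops after two characters; both sides recurse on b :: c :: t''
            have hA : scanA (a :: b :: c :: t'') = scanA (b :: c :: t'') := by
              rw [scanA]
              rw [if_neg (by tauto)]
            have hchain : pvChain ((b.toNat : Int) - (a.toNat : Int)) b (c :: t'') = 0 := by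
              rw [pvChain, if_neg hc]
            rw [hA, hchain]
            have := ih (b :: c :: t'') (by simp at ht ⊢; omega)
            simp only [List.drop_succ_cons, List.drop_zero, List.all_cons]
            simpa using this
      · rw [if_neg hstep]
        have hA : scanA (a :: b :: t') = scanA (b :: t') := by
          match t' with
          | [] => simp [scanA]
          | c :: t'' =>
            rw [scanA]
            rw [if_neg (by tauto)]
        rw [hA]
        have := ih (b :: t') (by simp at ht ⊢; omega)
        simpa using this

-- ===== VERDICT (by name: the statement is the Claim_ definition above) =====
theorem solution_spec : Claim_equal_solution := by
  intro password _
  show solution password = solution_alt password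
  have h1 := pvLoopA_eq_scanA password.toList password.toList 0 (by simp)
  have h2 := scanA_eq_runs password.toList.length password.toList le_rfl
  simpa [solution, solution_alt] using h1.trans h2
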